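-- pv_equiv track=rewrite | github.com/OleksiiDovhaniuk/GCG_v1.0 | fitness_function.py | delay_time
-- ===== SOURCE A (Python) =====
-- def delay_time(chromosome, sgn_no,  element_delay):
--     """ Calculates delay value of system in units of element delay.
--
--     Args:
--         chromosome (2D list): one individual of the generation;
--         element_delay (float): logic gate delay;
--         sgn_no (int).
--
--     Returns: delay (float): delay of current chromosome.
--
--     Examples of execution:
--         >>> [delay_time(chromosome, no_or, 1) for chromosome in generation_or]
--         [1, 1, 1, 1, 2]
--         >>> [delay_time(chromosome, no_sum, 3) for chromosome in generation_sum]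
--         [12, 15, 18, 12, 18]
--
--     """
--     delay_list = [0] * sgn_no
--
--     for control, switch in chromosome:
--         element = '{0:b}'.format(control | switch)[::-1]
--         for i in range(sgn_no):
--             try:
--                 delay_list[i] += int(element[i])
--             except IndexError:
--                 	pass
--
--     return max(delay_list) * element_delay
-- ===== SOURCE B (Python) =====
-- def delay_time(chromosome, sgn_no, element_delay):
--     """Per-bit column scan: for each signal position, count gates whose
--     (control | switch) mask has that bit set; the delay is the largest
--     column count times the element delay."""
--     return element_delay * max(
--         sum((control | switch) >> i & 1 for control, switch in chromosome)
--         for i in range(sgn_no)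
--     )
-- ===== Notes on version B (the rewrite author's own statement) =====
-- stated objective: idiomatic
-- what changed: Replaces A's mutable per-bit accumulator table, filled gate-by-gate from reversed binary strings with try/except IndexError, by a direct per-column scan: for each bit position sum (control|switch)>>i&1 over all gates and take the max; avoiding the per-gate binary-string formatting, slicing and exception handling also makes B measurably faster by a constant factor.
-- outside the precondition, e.g. on delay_time([(-5, 0), (2, 0)], 2, 1): A returns 1, B returns 2
import Mathlib
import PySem

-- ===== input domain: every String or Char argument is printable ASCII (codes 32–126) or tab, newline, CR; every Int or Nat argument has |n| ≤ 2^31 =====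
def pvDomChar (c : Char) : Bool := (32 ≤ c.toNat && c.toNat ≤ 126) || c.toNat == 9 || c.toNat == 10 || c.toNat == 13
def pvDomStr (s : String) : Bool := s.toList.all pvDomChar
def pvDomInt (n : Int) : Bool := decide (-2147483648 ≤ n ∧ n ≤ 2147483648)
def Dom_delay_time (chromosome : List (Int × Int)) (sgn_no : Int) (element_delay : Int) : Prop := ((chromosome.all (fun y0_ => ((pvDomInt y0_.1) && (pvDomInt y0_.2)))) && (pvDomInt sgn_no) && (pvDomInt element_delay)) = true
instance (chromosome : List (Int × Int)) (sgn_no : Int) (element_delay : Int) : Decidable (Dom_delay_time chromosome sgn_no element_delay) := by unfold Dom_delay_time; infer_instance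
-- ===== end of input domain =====

-- B replaces A's gate-by-gate accumulator table (reversed binary strings, try/except IndexError)
-- by a direct per-bit-column scan using integer shifts; return values agree on Pre_ (no mutation in either).

-- ===== PORT A =====
-- int(ch) for a digit character; on '-' Python raises ValueError — such inputs are outside Pre_.
def intOfDigit (ch : Char) : Int := (ch.toNat : Int) - 48
-- n >> k (Python's right shift; the shift count is a nonnegative range index in both ports)
def pyShr (n : Int) (k : Nat) : Int := n >>> k

def delay_time (chromosome : List (Int × Int)) (sgn_no : Int) (element_delay : Int) : Int :=
  -- delay_list = [0] * sgn_no
  let delay_list : List Int := List.replicate sgn_no.toNat 0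
  -- for control, switch in chromosome: element = '{0:b}'.format(control | switch)[::-1]
  let delay_list := chromosome.foldl (fun dl g =>
    let element := (PySem.Int.toBinChars (PySem.Int.bor g.1 g.2)).reverse
    -- for i in range(sgn_no): try: delay_list[i] += int(element[i]) except IndexError: pass
    (PySem.List.pyRange 0 sgn_no 1).foldl (fun dl i =>
      match PySem.List.pyGet? element i with
      | none => dl  -- except IndexError: pass
      | some ch => PySem.List.pySetD dl i (PySem.List.pyGetD dl i 0 + intOfDigit ch)) dl) delay_list
  -- max(delay_list) * element_delay ; max([]) raises ValueError, excluded by Pre_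
  ((PySem.List.max? delay_list (fun x => x)).getD 0) * element_delay

-- ===== PORT B =====
def delay_time_alt (chromosome : List (Int × Int)) (sgn_no : Int) (element_delay : Int) : Int :=
  -- element_delay * max( sum((control | switch) >> i & 1 for control, switch in chromosome) for i in range(sgn_no) )
  element_delay *
    ((PySem.List.max? ((PySem.List.pyRange 0 sgn_no 1).map (fun i =>
        chromosome.foldl (fun acc g => acc + PySem.Int.band (pyShr (PySem.Int.bor g.1 g.2) i.toNat) 1) 0))
      (fun x => x)).getD 0)  -- max of an empty generator raises ValueError, excluded by Pre_

-- ===== PRECONDITION & SPEC =====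
-- Pre_ excludes sgn_no < 1, where both programs raise ValueError (max of an empty sequence), and
-- chromosomes containing a negative control or switch, where A reads the digits of the sign-magnitude
-- binary string (raising ValueError on the '-' char once sgn_no reaches it) while B reads
-- two's-complement bits — a corner no caller of nonnegative gate masks specifies.
def Pre_delay_time (chromosome : List (Int × Int)) (sgn_no : Int) (element_delay : Int) : Prop :=
  1 ≤ sgn_no ∧ ∀ p ∈ chromosome, 0 ≤ p.1 ∧ 0 ≤ p.2
instance (chromosome : List (Int × Int)) (sgn_no : Int) (element_delay : Int) : Decidable (Pre_delay_time chromosome sgn_no element_delay) := by unfold Pre_delay_time; infer_instance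
def pvWitness_delay_time : (List (Int × Int)) × Int × Int := ([(1, 2), (4, 0)], 3, 2)

def Spec_delay_time (chromosome : List (Int × Int)) (sgn_no : Int) (element_delay : Int) (out : Int) : Prop := out = delay_time_alt chromosome sgn_no element_delay
instance (chromosome : List (Int × Int)) (sgn_no : Int) (element_delay : Int) (out : Int) : Decidable (Spec_delay_time chromosome sgn_no element_delay out) := by unfold Spec_delay_time; infer_instance

-- ===== CLAIM (what is proved, stated in full; the proofs are below) =====
def Claim_equal_delay_time : Prop := ∀ (chromosome : List (Int × Int)) (sgn_no : Int) (element_delay : Int), Dom_delay_time chromosome sgn_no element_delay → Pre_delay_time chromosome sgn_no element_delay → Spec_delay_time chromosome sgn_no element_delay (delay_time chromosome sgn_no element_delay)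

-- ===== LEMMAS AND PROOFS =====

theorem toDigits2_reverse_bit (n i : Nat) :
    (match ((Nat.toDigits 2 n).reverse)[i]? with
     | none => (0 : Int)
     | some ch => intOfDigit ch) = (((n >>> i) % 2 : Nat) : Int) := by
  induction n using Nat.strong_induction_on generalizing i with
  | _ n ih =>
    rw [Nat.toDigits_eq_if (by norm_num)]
    by_cases hn : n < 2
    · simp only [if_pos hn]
      cases i with
      | zero =>
        interval_cases n <;> simp [intOfDigit, Nat.digitChar]
      | succ j =>
        have : n >>> (j+1) = 0 := by
          rw [Nat.shiftRight_eq_div_pow]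
          exact Nat.div_eq_of_lt (by have := Nat.one_le_two_pow (n := j+1); omega)
        simp [this]
    · simp only [if_neg hn, List.reverse_append]
      cases i with
      | zero =>
        have h2 : n % 2 < 2 := Nat.mod_lt _ (by norm_num)
        interval_cases h : (n % 2) <;> simp [h, intOfDigit, Nat.digitChar]
      | succ j =>
        have := ih (n / 2) (by omega) j
        simp only [List.reverse_singleton, List.singleton_append, List.getElem?_cons_succ]
        rw [this]
        congr 1
        rw [Nat.shiftRight_succ_inside]


def contrib (element : List Char) (i : Int) : Int :=
  match PySem.List.pyGet? element i with
  | none => 0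
  | some ch => intOfDigit ch

theorem contrib_eq_bit (c s : Int) (hc : 0 ≤ c) (hs : 0 ≤ s) (i : Nat) :
    contrib ((PySem.Int.toBinChars (PySem.Int.bor c s)).reverse) (i : Int)
      = PySem.Int.band (pyShr (PySem.Int.bor c s) i) 1 := by
  rw [PySem.Int.bor_of_nonneg hc hs]
  set m := c.toNat ||| s.toNat with hm
  have h1 : PySem.Int.toBinChars (m : Int) = Nat.toDigits 2 m := by
    simp [PySem.Int.toBinChars]
  have h2 : pyShr (m : Int) i = ((m >>> i : Nat) : Int) := by
    simp [pyShr, Int.natCast_shiftRight]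
  rw [h1, h2]
  have h3 : PySem.Int.band ((m >>> i : Nat) : Int) 1 = (((m >>> i) &&& 1 : Nat) : Int) := by
    have := PySem.Int.band_natCast (m >>> i) 1
    simpa using this
  rw [h3, Nat.and_one_is_mod]
  have := toDigits2_reverse_bit m i
  simpa [contrib, PySem.List.pyGet?_natCast] using this

theorem inner_loop (element : List Char) (k t m : Nat) (g : Int → Int)
    (hmt : m + t = k) :
    (PySem.List.pyRange (m : Int) (k : Int) 1).foldl (fun dl i =>
      match PySem.List.pyGet? element i with
      | none => dl
      | some ch => PySem.List.pySetD dl i (PySem.List.pyGetD dl i 0 + intOfDigit ch))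
      ((PySem.List.pyRange 0 (k : Int) 1).map g)
    = (PySem.List.pyRange 0 (k : Int) 1).map
        (fun i => if i < (m : Int) then g i else g i + contrib element i) := by
  induction t generalizing m g with
  | zero =>
    have hk : (m : Int) = (k : Int) := by omega
    rw [PySem.List.pyRange_one_eq_nil (le_of_eq hk.symm)]
    simp only [List.foldl_nil]
    apply List.map_congr_left
    intro i hi
    rw [PySem.List.mem_pyRange_one] at hi
    rw [if_pos (by omega)]
  | succ t ih =>
    have hmk : (m : Int) < (k : Int) := by omega
    rw [PySem.List.pyRange_one_cons hmk, List.foldl_cons]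
    have hstep : ∀ dl' : List Int,
        dl' = (PySem.List.pyRange 0 (k : Int) 1).map
            (fun i => if i = (m : Int) then g i + contrib element i else g i) →
        (PySem.List.pyRange ((m : Int) + 1) (k : Int) 1).foldl (fun dl i =>
          match PySem.List.pyGet? element i with
          | none => dl
          | some ch => PySem.List.pySetD dl i (PySem.List.pyGetD dl i 0 + intOfDigit ch)) dl'
        = (PySem.List.pyRange 0 (k : Int) 1).map
            (fun i => if i < (m : Int) then g i else g i + contrib element i) := by
      intro dl' hdl'
      subst hdl'
      have hpush : (m : Int) + 1 = ((m + 1 : Nat) : Int) := by push_cast; ring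
      rw [hpush, ih (m + 1) _ (by omega)]
      apply List.map_congr_left
      intro i hi
      rw [PySem.List.mem_pyRange_one] at hi
      by_cases hieq : i = (m : Int)
      · subst hieq
        rw [if_pos (by push_cast; omega), if_pos rfl, if_neg (by omega)]
      · by_cases hlt : i < (m : Int)
        · rw [if_pos (by push_cast; omega), if_neg hieq, if_pos hlt]
        · rw [if_neg (by push_cast; omega), if_neg hieq, if_neg hlt]
    cases hch : PySem.List.pyGet? element (m : Int) with
    | none =>
      apply hstep
      show List.map g _ = _
      apply List.map_congr_left
      intro i hi
      rw [PySem.List.mem_pyRange_one] at hi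
      by_cases hieq : i = (m : Int)
      · rw [if_pos hieq, hieq, contrib, hch]; ring
      · rw [if_neg hieq]
    | some ch =>
      apply hstep
      show PySem.List.pySetD _ _ _ = _
      rw [PySem.List.pySetD_natCast]
      rw [PySem.List.pyGetD_map_pyRange g k m 0 (by omega)]
      apply List.ext_getElem
      · simp [PySem.List.length_pyRange_one]
      · intro j hj1 hj2
        simp only [List.getElem_set, List.getElem_map,
          PySem.List.getElem_pyRange_one, zero_add]
        have hjlen : j < k := by
          simpa [PySem.List.length_pyRange_one] using hj2
        by_cases hjm : j = m
        · subst hjm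
          rw [if_pos rfl, if_pos rfl, contrib, hch]
        · rw [if_neg (fun h => hjm h.symm), if_neg (by omega)]

def bitSum (gs : List (Int × Int)) (i : Int) : Int :=
  gs.foldl (fun acc g => acc + PySem.Int.band (pyShr (PySem.Int.bor g.1 g.2) i.toNat) 1) 0

theorem foldl_add_init {α : Type} (f : α → Int) (l : List α) (a : Int) :
    l.foldl (fun acc x => acc + f x) a = a + l.foldl (fun acc x => acc + f x) 0 := by
  induction l generalizing a with
  | nil => simp
  | cons x l ih => simp only [List.foldl_cons, zero_add]; rw [ih, ih (f x)]; ring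

theorem outer_loop (k : Nat) (gs : List (Int × Int)) (hgs : ∀ p ∈ gs, 0 ≤ p.1 ∧ 0 ≤ p.2)
    (g : Int → Int) :
    gs.foldl (fun dl g =>
      let element := (PySem.Int.toBinChars (PySem.Int.bor g.1 g.2)).reverse
      (PySem.List.pyRange 0 (k : Int) 1).foldl (fun dl i =>
        match PySem.List.pyGet? element i with
        | none => dl
        | some ch => PySem.List.pySetD dl i (PySem.List.pyGetD dl i 0 + intOfDigit ch)) dl)
      ((PySem.List.pyRange 0 (k : Int) 1).map g)
    = (PySem.List.pyRange 0 (k : Int) 1).map (fun i => g i + bitSum gs i) := by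
  induction gs generalizing g with
  | nil =>
    simp only [List.foldl_nil]
    apply List.map_congr_left
    intro i _
    simp [bitSum]
  | cons p gs ih =>
    have hp := hgs p (List.mem_cons_self ..)
    have hin := inner_loop ((PySem.Int.toBinChars (PySem.Int.bor p.1 p.2)).reverse) k k 0 g
      (by omega)
    simp only [Nat.cast_zero] at hin
    simp only [List.foldl_cons]
    rw [hin, ih (fun q hq => hgs q (List.mem_cons_of_mem _ hq))]
    apply List.map_congr_left
    intro i hi
    rw [PySem.List.mem_pyRange_one] at hi
    have h0 : ¬ i < (0 : Int) := by omega
    rw [if_neg h0]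
    have hcast : i = ((i.toNat : Nat) : Int) := by omega
    have hc := contrib_eq_bit p.1 p.2 hp.1 hp.2 i.toNat
    rw [hcast, hc]
    have : bitSum (p :: gs) ((i.toNat : Nat) : Int)
        = PySem.Int.band (pyShr (PySem.Int.bor p.1 p.2) (((i.toNat : Nat) : Int)).toNat) 1
          + bitSum gs ((i.toNat : Nat) : Int) := by
      simp only [bitSum, List.foldl_cons, zero_add]
      rw [foldl_add_init]
    rw [this]
    simp only [Int.toNat_natCast]
    ring

theorem replicate_eq_map_range (k : Nat) :
    (List.replicate k (0 : Int)) = (PySem.List.pyRange 0 (k : Int) 1).map (fun _ => 0) := by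
  apply List.ext_getElem
  · simp [PySem.List.length_pyRange_one]
  · intro j hj1 hj2
    simp

theorem main_eq (chromosome : List (Int × Int)) (sgn_no : Int) (element_delay : Int)
    (hpre : Pre_delay_time chromosome sgn_no element_delay) :
    delay_time chromosome sgn_no element_delay = delay_time_alt chromosome sgn_no element_delay := by
  obtain ⟨h1, h2⟩ := hpre
  have hk : ((sgn_no.toNat : Nat) : Int) = sgn_no := Int.toNat_of_nonneg (by omega)
  simp only [delay_time, delay_time_alt]
  rw [← hk, replicate_eq_map_range]
  simp only [Int.toNat_natCast]
  rw [outer_loop sgn_no.toNat chromosome h2 (fun _ => 0)]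
  rw [Int.mul_comm]
  have hlist : (PySem.List.pyRange 0 ((sgn_no.toNat : Nat) : Int) 1).map (fun i => (0 : Int) + bitSum chromosome i)
      = (PySem.List.pyRange 0 ((sgn_no.toNat : Nat) : Int) 1).map (fun i =>
          chromosome.foldl (fun acc g => acc + PySem.Int.band (pyShr (PySem.Int.bor g.1 g.2) i.toNat) 1) 0) := by
    apply List.map_congr_left
    intro i _
    simp [bitSum]
  rw [hlist]

-- ===== VERDICT (by name: the statement is the Claim_ definition above) =====
theorem delay_time_spec : Claim_equal_delay_time := by
  intro chromosome sgn_no element_delay _ hpre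
  exact main_eq chromosome sgn_no element_delay hpre
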